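-- pv_equiv track=rewrite | github.com/rlogger/ErrP | bci/mental_command_worker.py | resolve_channel_order
-- ===== SOURCE A (Python) =====
-- def canonicalize_channel_name(name: str) -> str:
--     cleaned = str(name).strip()
--     cleaned = cleaned.replace("EEG ", "")
--     cleaned = cleaned.replace("EEG_", "")
--     cleaned = cleaned.replace("-Pz", "")
--     cleaned = cleaned.replace("-PZ", "")
--     cleaned = cleaned.replace(" ", "")
--     return cleaned.upper()
--
-- def resolve_channel_order(
--     available_names: list[str] | tuple[str, ...],
--     desired_names: list[str] | tuple[str, ...],
-- ) -> tuple[list[str], list[str]]: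
--     actual_by_key: dict[str, str] = {}
--     for name in available_names:
--         key = canonicalize_channel_name(name)
--         if key not in actual_by_key:
--             actual_by_key[key] = str(name)
--
--     resolved: list[str] = []
--     missing: list[str] = []
--     for desired in desired_names:
--         actual = actual_by_key.get(canonicalize_channel_name(desired))
--         if actual is None:
--             missing.append(str(desired))
--         else:
--             resolved.append(actual)
--     return resolved, missing
-- ===== SOURCE B (Python) =====
-- def canonicalize_channel_name(name: str) -> str:
--     cleaned = str(name).strip()
--     cleaned = cleaned.replace("EEG ", "")
--     cleaned = cleaned.replace("EEG_", "")
--     cleaned = cleaned.replace("-Pz", "")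
--     cleaned = cleaned.replace("-PZ", "")
--     cleaned = cleaned.replace(" ", "")
--     return cleaned.upper()
--
-- def resolve_channel_order(available_names, desired_names):
--     resolved = []
--     missing = []
--     for desired in desired_names:
--         key = canonicalize_channel_name(desired)
--         for avail in available_names:
--             if canonicalize_channel_name(avail) == key:
--                 resolved.append(str(avail))
--                 break
--         else:
--             missing.append(str(desired))
--     return resolved, missing
-- ===== Notes on version B (the rewrite author's own statement) =====
-- stated objective: simpler
-- what changed: Drops the precomputed first-occurrence dictionary; for each desired name B scans available_names forward for the first name with the same canonical key, so no index is built or maintained.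
import Mathlib
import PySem

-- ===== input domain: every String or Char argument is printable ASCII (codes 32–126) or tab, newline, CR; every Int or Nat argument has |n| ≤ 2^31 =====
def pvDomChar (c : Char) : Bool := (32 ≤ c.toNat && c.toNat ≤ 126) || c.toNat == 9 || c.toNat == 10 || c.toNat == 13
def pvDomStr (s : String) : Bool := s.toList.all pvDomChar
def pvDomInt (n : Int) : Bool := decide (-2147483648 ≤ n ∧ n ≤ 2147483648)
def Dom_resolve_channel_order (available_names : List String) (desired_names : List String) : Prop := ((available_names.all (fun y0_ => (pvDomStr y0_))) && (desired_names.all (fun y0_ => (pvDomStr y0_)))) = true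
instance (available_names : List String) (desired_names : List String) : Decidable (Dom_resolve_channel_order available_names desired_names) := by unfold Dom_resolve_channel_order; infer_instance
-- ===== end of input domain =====

-- B change (objective: simpler): drop A's precomputed first-occurrence dictionary and,
-- per desired name, scan available_names forward for the first canonical match.

-- shared helper: canonicalize_channel_name
def canonChan (name : String) : String :=
  PySem.Str.upper
    (PySem.Str.replace
      (PySem.Str.replace
        (PySem.Str.replace
          (PySem.Str.replace
            (PySem.Str.replace (PySem.Str.strip name) "EEG " "")
            "EEG_" "")
          "-Pz" "")
        "-PZ" "")
      " " "")

-- ===== PORT A =====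
def resolve_channel_order (available_names : List String) (desired_names : List String) : List String × List String :=
  let actual_by_key : PySem.Dict String String :=
    available_names.foldl
      (fun d name =>
        let key := canonChan name
        if (d.get? key).isNone then d.insert key name else d)
      PySem.Dict.empty
  (desired_names.foldl
    (fun (rm : List String × List String) desired =>
      match actual_by_key.get? (canonChan desired) with
      | none => (rm.1, rm.2 ++ [desired])
      | some actual => (rm.1 ++ [actual], rm.2))
    ([], []))

-- ===== PORT B =====
def resolve_channel_order_alt (available_names : List String) (desired_names : List String) : List String × List String :=
  desired_names.foldl
    (fun (rm : List String × List String) desired =>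
      let key := canonChan desired
      match available_names.find? (fun avail => canonChan avail == key) with
      | some avail => (rm.1 ++ [avail], rm.2)
      | none => (rm.1, rm.2 ++ [desired]))
    ([], [])

-- ===== PRECONDITION & SPEC =====
def Spec_resolve_channel_order (available_names : List String) (desired_names : List String) (out : List String × List String) : Prop := out = resolve_channel_order_alt available_names desired_names
instance (available_names : List String) (desired_names : List String) (out : List String × List String) : Decidable (Spec_resolve_channel_order available_names desired_names out) := by unfold Spec_resolve_channel_order; infer_instance

-- ===== CLAIM (what is proved, stated in full; the proofs are below) =====
def Claim_equal_resolve_channel_order : Prop := ∀ (available_names : List String) (desired_names : List String), Dom_resolve_channel_order available_names desired_names → Spec_resolve_channel_order available_names desired_names (resolve_channel_order available_names desired_names)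

-- ===== LEMMAS AND PROOFS =====

-- lookup in A's no-overwrite dictionary is the first canonical match in the list
theorem get?_buildDict (avail : List String) (d : PySem.Dict String String) (k : String) :
    (avail.foldl
      (fun d name =>
        let key := canonChan name
        if (d.get? key).isNone then d.insert key name else d) d).get? k
    = (d.get? k).or (avail.find? (fun a => canonChan a == k)) := by
  induction avail generalizing d with
  | nil => simp
  | cons a rest ih =>
    rw [List.foldl_cons, ih, List.find?_cons]
    show ((if (d.get? (canonChan a)).isNone then d.insert (canonChan a) a else d).get? k).or _ = _
    by_cases hk : canonChan a = k
    · subst hk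
      cases hd : d.get? (canonChan a) with
      | none => simp [PySem.Dict.get?_insert_self]
      | some v => simp [hd]
    · have hne : k ≠ canonChan a := fun h => hk h.symm
      have hbeq : (canonChan a == k) = false := by simp [hk]
      cases hd : d.get? (canonChan a) with
      | none => simp [PySem.Dict.get?_insert_of_ne _ _ hne, hbeq]
      | some v => simp [hbeq]

-- ===== VERDICT (by name: the statement is the Claim_ definition above) =====
theorem resolve_channel_order_spec : Claim_equal_resolve_channel_order := by
  intro available_names desired_names _
  unfold Spec_resolve_channel_order resolve_channel_order resolve_channel_order_alt
  apply PySem.List.foldl_congr_mem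
  intro rm desired _
  rw [get?_buildDict]
  simp only [PySem.Dict.get?_empty, Option.none_or]
  cases List.find? (fun a => canonChan a == canonChan desired) available_names <;> rfl
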